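-- pv_equiv track=rewrite | github.com/ThalesGroup/agilab | src/agilab/pages/4_ANALYSIS.py | _configured_notebook_options
-- ===== SOURCE A (Python) =====
-- def _dedupe_preserve_order(values: list[str]) -> list[str]:
--     seen: set[str] = set()
--     result: list[str] = []
--     for value in values:
--         if value in seen:
--             continue
--         seen.add(value)
--         result.append(value)
--     return result
--
-- def _normalize_notebook_name(value: object) -> str:
--     if not isinstance(value, str):
--         return ""
--     normalized = value.strip().replace("\\", "/")
--     while normalized.startswith("/"):
--         normalized = normalized[1:]
--     return normalized
--
-- def _configured_notebook_options(
--     configured_notebooks: object,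
--     available_notebooks: list[str],
-- ) -> list[str]:
--     """Resolve persisted notebook selections into available multiselect options."""
--     if not isinstance(configured_notebooks, list):
--         return []
--     available = set(available_notebooks)
--     options: list[str] = []
--     for value in configured_notebooks:
--         normalized = _normalize_notebook_name(value)
--         if normalized in available:
--             options.append(normalized)
--     return _dedupe_preserve_order(options)
-- ===== SOURCE B (Python) =====
-- def _normalize_notebook_name(value: object) -> str:
--     if not isinstance(value, str):
--         return ""
--     normalized = value.strip().replace("\\", "/")
--     while normalized.startswith("/"):
--         normalized = normalized[1:]
--     return normalized
--
--
-- def _configured_notebook_options(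
--     configured_notebooks: object,
--     available_notebooks: list[str],
-- ) -> list[str]:
--     """Resolve persisted notebook selections into available multiselect options."""
--     if not isinstance(configured_notebooks, list):
--         return []
--
--     def go(names: list[str]) -> list[str]:
--         if not names:
--             return []
--         head = names[0]
--         rest = go([n for n in names[1:] if n != head])
--         return [head] + rest if head in available_notebooks else rest
--
--     return go([_normalize_notebook_name(v) for v in configured_notebooks])
-- ===== Notes on version B (the rewrite author's own statement) =====
-- stated objective: alternative
-- what changed: Replaces A's set-filter pass followed by a seen-set dedupe pass with a structural recursion that needs no sets at all: normalize everything once, then recursively keep the head (if it is in available_notebooks, checked by list membership) and delete its later duplicates from the tail before recursing.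
import Mathlib
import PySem

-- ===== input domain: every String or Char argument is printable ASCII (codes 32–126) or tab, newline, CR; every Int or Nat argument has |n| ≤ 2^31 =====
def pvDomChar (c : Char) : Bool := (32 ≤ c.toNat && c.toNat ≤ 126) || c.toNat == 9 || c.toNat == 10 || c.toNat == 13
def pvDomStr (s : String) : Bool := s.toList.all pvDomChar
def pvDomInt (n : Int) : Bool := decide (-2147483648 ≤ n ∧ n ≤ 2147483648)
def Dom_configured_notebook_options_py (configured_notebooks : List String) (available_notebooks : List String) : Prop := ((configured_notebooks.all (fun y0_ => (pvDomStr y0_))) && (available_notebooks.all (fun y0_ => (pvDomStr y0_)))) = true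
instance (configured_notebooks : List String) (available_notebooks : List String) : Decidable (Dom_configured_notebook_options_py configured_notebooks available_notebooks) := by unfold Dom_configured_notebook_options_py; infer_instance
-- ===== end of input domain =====

-- B replaces A's set-filter pass + seen-set dedupe pass with a structural recursion that
-- uses no sets: normalize once, then keep the head (list membership in available_notebooks)
-- and delete its later duplicates from the tail before recursing. Alternative, same result.
-- (All arguments are List String under the type convention, so the isinstance guards of
-- the Python, which only fire on non-list / non-str input, have no counterpart here.)

-- ===== PORT A =====
-- the `while normalized.startswith("/")` loop of _normalize_notebook_name, on the char list
def pvDropSlashes : List Char → List Char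
  | '/' :: rest => pvDropSlashes rest
  | l => l

-- _normalize_notebook_name (the value is always a str here, so the isinstance branch is gone)
def normalizeNotebookName (value : String) : String :=
  String.ofList (pvDropSlashes (PySem.Str.replace (PySem.Str.strip value) "\\" "/").toList)

-- _dedupe_preserve_order
def dedupePreserveOrder (values : List String) : List String :=
  (values.foldl
    (fun (st : PySem.Set String × List String) v =>
      if PySem.Set.contains st.1 v then st
      else (PySem.Set.add st.1 v, st.2 ++ [v]))
    (PySem.Set.empty, [])).2

def configured_notebook_options_py (configured_notebooks : List String) (available_notebooks : List String) : List String :=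
  let available := PySem.Set.ofList available_notebooks
  let options := configured_notebooks.foldl
    (fun acc value =>
      let normalized := normalizeNotebookName value
      if PySem.Set.contains available normalized then acc ++ [normalized] else acc)
    []
  dedupePreserveOrder options

-- ===== PORT B =====
-- the inner recursive `go` of Source B: keep head if available, recurse on tail minus duplicates
def goNb (available_notebooks : List String) : List String → List String
  | [] => []
  | head :: tail =>
    let rest := goNb available_notebooks (tail.filter (fun n => n ≠ head))
    if available_notebooks.contains head then head :: rest else rest
termination_by names => names.length
decreasing_by
  simp only [List.length_unattach]
  exact Nat.lt_succ_of_le ((List.length_filter_le _ _).trans (by simp))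

def configured_notebook_options_py_alt (configured_notebooks : List String) (available_notebooks : List String) : List String :=
  goNb available_notebooks (configured_notebooks.map normalizeNotebookName)

-- ===== PRECONDITION & SPEC =====
def Spec_configured_notebook_options_py (configured_notebooks : List String) (available_notebooks : List String) (out : List String) : Prop := out = configured_notebook_options_py_alt configured_notebooks available_notebooks
instance (configured_notebooks : List String) (available_notebooks : List String) (out : List String) : Decidable (Spec_configured_notebook_options_py configured_notebooks available_notebooks out) := by unfold Spec_configured_notebook_options_py; infer_instance

-- ===== CLAIM (what is proved, stated in full; the proofs are below) =====
def Claim_equal_configured_notebook_options_py : Prop := ∀ (configured_notebooks : List String) (available_notebooks : List String), Dom_configured_notebook_options_py configured_notebooks available_notebooks → Spec_configured_notebook_options_py configured_notebooks available_notebooks (configured_notebook_options_py configured_notebooks available_notebooks)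

-- ===== LEMMAS AND PROOFS =====

-- dedupe-only counterpart of goNb (proof helper)
def goAll : List String → List String
  | [] => []
  | h :: t => h :: goAll (t.filter (fun n => n ≠ h))
termination_by names => names.length
decreasing_by
  simp only [List.length_unattach]
  exact Nat.lt_succ_of_le ((List.length_filter_le _ _).trans (by simp))

theorem goAll_nil : goAll [] = [] := by rw [goAll.eq_def]
theorem goAll_cons (h : String) (t : List String) :
    goAll (h :: t) = h :: goAll (t.filter (fun n => n ≠ h)) := by rw [goAll.eq_def]
theorem goNb_nil (an : List String) : goNb an [] = [] := by rw [goNb.eq_def]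
theorem goNb_cons (an : List String) (h : String) (t : List String) :
    goNb an (h :: t) = (let rest := goNb an (t.filter (fun n => n ≠ h));
      if an.contains h then h :: rest else rest) := by rw [goNb.eq_def]

-- A's seen-set dedupe fold from state (S, acc) = acc ++ tail-filtering dedupe of (l minus S)
theorem dedupe_eq_goAll :
    ∀ (l : List String) (S : PySem.Set String) (acc : List String),
      (l.foldl (fun (st : PySem.Set String × List String) v =>
          if PySem.Set.contains st.1 v then st
          else (PySem.Set.add st.1 v, st.2 ++ [v])) (S, acc)).2
      = acc ++ goAll (l.filter (fun n => !PySem.Set.contains S n)) := by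
  intro l
  induction l with
  | nil => intro S acc; simp [goAll_nil]
  | cons h t ih =>
    intro S acc
    by_cases hS : h ∈ S
    · simp only [List.foldl_cons, List.filter_cons]
      rw [if_pos (by simpa using hS)]
      have : (!PySem.Set.contains S h) = false := by simpa using hS
      rw [this, if_neg Bool.false_ne_true, ih]
    · have hfilter : t.filter (fun n => !PySem.Set.contains (PySem.Set.add S h) n)
          = (t.filter (fun n => !PySem.Set.contains S n)).filter (fun n => n ≠ h) := by
        rw [List.filter_filter]
        apply List.filter_congr
        intro x _
        by_cases hx : x = h
        · simp [hx, PySem.Set.mem_add]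
        · simp [hx, PySem.Set.mem_add]
      have hc : (!PySem.Set.contains S h) = true := by simpa using hS
      simp only [List.foldl_cons, List.filter_cons, hc]
      rw [if_neg (by simpa using hS), ih, hfilter]
      simp [goAll_cons]

-- B's go = availability filter then tail-filtering dedupe (duplicates share availability)
theorem goNb_eq_goAll (an : List String) (ns : List String) :
    goNb an ns = goAll (ns.filter (fun n => an.contains n)) := by
  match ns with
  | [] => rw [goNb_nil, List.filter_nil, goAll_nil]
  | h :: t =>
    have ih := goNb_eq_goAll an (t.filter (fun n => n ≠ h))
    rw [goNb_cons, List.filter_cons]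
    simp only []
    by_cases ha : h ∈ an
    · rw [if_pos (by simpa using ha)]
      have hcon : (List.contains an h) = true := by simpa using ha
      rw [hcon, if_pos rfl, goAll_cons, ih, List.filter_filter, List.filter_filter]
      have : (t.filter (fun a => an.contains a && decide ¬a = h))
           = (t.filter (fun a => decide ¬a = h && an.contains a)) := by
        apply List.filter_congr; intro x _; rw [Bool.and_comm]
      simp only [this]
    · rw [if_neg (by simpa using ha)]
      have hcon : (List.contains an h) = false := by simpa using ha
      rw [hcon, if_neg Bool.false_ne_true, ih, List.filter_filter]
      have : (t.filter (fun a => an.contains a && decide ¬a = h))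
           = (t.filter (fun a => an.contains a)) := by
        apply List.filter_congr; intro x hx
        by_cases hxa : x ∈ an
        · have : x ≠ h := fun e => ha (e ▸ hxa)
          simp [hxa, this]
        · simp [hxa]
      rw [this]
termination_by ns.length
decreasing_by simpa using Nat.lt_succ_of_le (List.length_filter_le _ _)

-- A's filtering loop = availability filter of the normalized list
theorem filterA (avail : PySem.Set String) :
    ∀ (cn : List String) (acc : List String),
      cn.foldl (fun acc value =>
          if PySem.Set.contains avail (normalizeNotebookName value)
          then acc ++ [normalizeNotebookName value] else acc) acc
      = acc ++ (cn.map normalizeNotebookName).filter (fun n => PySem.Set.contains avail n) := by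
  intro cn
  induction cn with
  | nil => intro acc; simp
  | cons v t ih =>
    intro acc
    by_cases h : PySem.Set.contains avail (normalizeNotebookName v) = true
    · simp only [List.foldl_cons, List.map_cons, List.filter_cons]
      rw [if_pos h, ih, h, if_pos rfl]
      simp
    · simp only [List.foldl_cons, List.map_cons, List.filter_cons]
      rw [if_neg h, ih]
      rw [show (PySem.Set.contains avail (normalizeNotebookName v)) = false by simpa using h]
      rw [if_neg Bool.false_ne_true]

-- ===== VERDICT (by name: the statement is the Claim_ definition above) =====
theorem configured_notebook_options_py_spec : Claim_equal_configured_notebook_options_py := by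
  intro cn an _
  show configured_notebook_options_py cn an = configured_notebook_options_py_alt cn an
  simp only [configured_notebook_options_py, configured_notebook_options_py_alt,
    dedupePreserveOrder]
  rw [filterA, List.nil_append, dedupe_eq_goAll, List.nil_append, goNb_eq_goAll,
    List.filter_filter]
  congr 1
  apply List.filter_congr
  intro x _
  simp [PySem.Set.empty, PySem.Set.mem_ofList]
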